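-- pv_equiv track=rewrite | github.com/H0r4c3/Python_00_ALL | Misc/convert_number_to_words.py | number_2_word
-- ===== SOURCE A (Python) =====
-- def number_2_word(n):
--     digits_list = ['zero', 'one', 'two', 'three', 'four', 'five', 'six', 'seven', 'eight', 'nine']
--
--     if n==0:
--         return ""
--
--     else:
--         # compute spelling for the last digit
--         units = digits_list[n % 10]
--
--         # keep computing for the previous digits and add the spelling for the last digit
--         words = number_2_word(int(n/10)) + units + " "
--
--     return words
-- ===== SOURCE B (Python) =====
-- def number_2_word(n):
--     digits_list = ['zero', 'one', 'two', 'three', 'four', 'five', 'six', 'seven', 'eight', 'nine']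
--     words = ""
--     while n != 0:
--         words = digits_list[n % 10] + " " + words
--         n = int(n / 10)
--     return words
-- ===== Notes on version B (the rewrite author's own statement) =====
-- stated objective: simpler
-- what changed: Replaces the recursive most-significant-first build (recurse on int(n/10), then append the digit word) with an iterative while-loop that prepends each least-significant digit word onto an accumulator, so no call stack is used.
import Mathlib
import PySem

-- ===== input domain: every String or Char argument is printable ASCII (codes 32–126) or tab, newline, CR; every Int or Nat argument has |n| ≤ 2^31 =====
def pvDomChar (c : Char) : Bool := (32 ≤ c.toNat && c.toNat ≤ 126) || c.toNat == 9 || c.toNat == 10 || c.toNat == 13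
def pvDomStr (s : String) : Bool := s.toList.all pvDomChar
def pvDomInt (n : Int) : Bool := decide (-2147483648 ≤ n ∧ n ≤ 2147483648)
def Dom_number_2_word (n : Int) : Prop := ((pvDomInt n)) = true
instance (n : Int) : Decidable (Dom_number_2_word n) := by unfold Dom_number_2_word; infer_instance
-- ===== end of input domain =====

-- B replaces A's recursion (recurse on int(n/10), then append the digit word) with an
-- iterative accumulator loop that prepends each least-significant digit word; same output.


-- termination helper for both ports (A recurses and B loops on int(n/10))
theorem pv_truncdiv_decreasing (n : Int) (h : ¬ n = 0) :
    (PySem.Int.truncdiv n 10).natAbs < n.natAbs := by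
  have he : PySem.Int.truncdiv n 10 = n.tdiv 10 := by simp [PySem.Int.truncdiv]
  rw [he, Int.natAbs_tdiv]
  exact Nat.div_lt_self (by omega) (by norm_num)

-- ===== PORT A =====
def digits_list : List String :=
  ["zero", "one", "two", "three", "four", "five", "six", "seven", "eight", "nine"]

-- n % 10 with n % 10 ∈ [0,10) always in range, so the .getD "" default is never used
def number_2_word (n : Int) : String :=
  if n = 0 then ""
  else
    let units := (PySem.List.pyGet? digits_list (PySem.Int.mod n 10)).getD ""
    number_2_word (PySem.Int.truncdiv n 10) ++ units ++ " "
termination_by n.natAbs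
decreasing_by exact pv_truncdiv_decreasing n (by assumption)

-- ===== PORT B =====
-- the while-loop of Source B: state (n, words), prepend the digit word each step
def number_2_word_alt_loop (n : Int) (words : String) : String :=
  if n = 0 then words
  else number_2_word_alt_loop (PySem.Int.truncdiv n 10)
        ((PySem.List.pyGet? digits_list (PySem.Int.mod n 10)).getD "" ++ " " ++ words)
termination_by n.natAbs
decreasing_by exact pv_truncdiv_decreasing n (by assumption)

def number_2_word_alt (n : Int) : String := number_2_word_alt_loop n ""

-- ===== PRECONDITION & SPEC =====
def Spec_number_2_word (n : Int) (out : String) : Prop := out = number_2_word_alt n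
instance (n : Int) (out : String) : Decidable (Spec_number_2_word n out) := by unfold Spec_number_2_word; infer_instance

-- ===== CLAIM (what is proved, stated in full; the proofs are below) =====
def Claim_equal_number_2_word : Prop := ∀ (n : Int), Dom_number_2_word n → Spec_number_2_word n (number_2_word n)

-- ===== LEMMAS AND PROOFS =====
theorem loop_eq_append (n : Int) :
    ∀ w : String, number_2_word_alt_loop n w = number_2_word n ++ w := by
  induction n using number_2_word.induct with
  | case1 =>
      intro w
      rw [number_2_word_alt_loop, number_2_word]
      simp
  | case2 n h ih =>
      intro w
      rw [number_2_word_alt_loop, number_2_word]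
      simp only [h, if_false]
      rw [ih]
      simp [String.append_assoc]

-- ===== VERDICT (by name: the statement is the Claim_ definition above) =====
theorem number_2_word_spec : Claim_equal_number_2_word := by
  intro n _
  unfold Spec_number_2_word number_2_word_alt
  rw [loop_eq_append]
  simp
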